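-- pv_equiv track=rewrite | github.com/Buront2610/Fantasy_simulator | fantasy_simulator/language/naming.py | tidy_word
-- ===== SOURCE A (Python) =====
-- from typing import Callable, Iterable, List, Mapping
--
-- def tidy_word(text: str) -> str:
--     result = text.lower().replace(" ", "")
--     for repeated in ("aaa", "eee", "iii", "ooo", "uuu"):
--         while repeated in result:
--             result = result.replace(repeated, repeated[:2])
--     collapsed: List[str] = []
--     for char in result:
--         if len(collapsed) >= 2 and collapsed[-1] == collapsed[-2] == char:
--             continue
--         collapsed.append(char)
--     return "".join(collapsed)
-- ===== SOURCE B (Python) =====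
-- def tidy_word(text: str) -> str:
--     s = text.lower().replace(" ", "")
--     out = []
--     i, n = 0, len(s)
--     while i < n:
--         j = i
--         while j < n and s[j] == s[i]:
--             j += 1
--         out.append(s[i] * min(j - i, 2))
--         i = j
--     return "".join(out)
-- ===== Notes on version B (the rewrite author's own statement) =====
-- stated objective: simpler
-- what changed: Replaces A's five repeated-substring replace loops plus a last-two-equal append filter with a single two-pointer scan over maximal runs of equal characters, emitting min(run length, 2) copies of each character; the vowel-specific loops disappear because the run cap subsumes them.
import Mathlib
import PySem

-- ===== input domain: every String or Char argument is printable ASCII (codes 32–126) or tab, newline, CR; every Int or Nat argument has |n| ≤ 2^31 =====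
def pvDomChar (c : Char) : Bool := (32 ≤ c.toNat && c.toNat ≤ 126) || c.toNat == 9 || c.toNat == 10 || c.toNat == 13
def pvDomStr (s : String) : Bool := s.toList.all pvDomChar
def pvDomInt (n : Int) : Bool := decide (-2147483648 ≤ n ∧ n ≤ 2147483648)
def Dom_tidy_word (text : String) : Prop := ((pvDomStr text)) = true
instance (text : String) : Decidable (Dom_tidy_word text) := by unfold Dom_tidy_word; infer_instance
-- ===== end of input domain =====

-- B replaces A's vowel-specific replace loops and last-two-equal append filter by one
-- run-scan that emits min(run length, 2) copies of each character (objective: simpler).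


-- ===== PORT A =====
-- `while repeated in result: result = result.replace(repeated, repeated[:2])`,
-- with fuel = current length (each pass that fires shortens the string, so the fuel suffices).
def pvVloop (a : Char) : Nat → List Char → List Char
  | 0, s => s
  | fuel + 1, s =>
    if PySem.Chars.isIn [a, a, a] s then
      pvVloop a fuel (PySem.Chars.replace s [a, a, a] [a, a])
    else s

-- one step of the `for char in result` loop (skip unless appended; append otherwise)
def pvStepA (collapsed : List Char) (char : Char) : List Char :=
  if 2 ≤ collapsed.length ∧ PySem.List.pyGet? collapsed (-1) = some char
      ∧ PySem.List.pyGet? collapsed (-2) = some char then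
    collapsed
  else collapsed ++ [char]

def tidy_word (text : String) : String :=
  let result := PySem.Str.replace (PySem.Str.lower text) " " ""
  let result := List.foldl (fun r a => pvVloop a r.length r) result.toList ['a', 'e', 'i', 'o', 'u']
  let collapsed := List.foldl pvStepA [] result
  String.ofList collapsed

-- ===== PORT B =====
-- outer while-loop = recursion on the rest of the string, inner while-loop (advance j over
-- the current run) = takeWhile/dropWhile; each piece is s[i] * min(j - i, 2).
def pvRunPieces : List Char → List (List Char)
  | [] => []
  | c :: t =>
    List.replicate (min (1 + (t.takeWhile (· == c)).length) 2) c :: pvRunPieces (t.dropWhile (· == c))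
  termination_by l => l.length
  decreasing_by
    have := List.length_dropWhile_le (· == c) t
    simp only [List.length_cons]
    omega

def tidy_word_alt (text : String) : String :=
  let s := PySem.Str.replace (PySem.Str.lower text) " " ""
  String.ofList (List.flatten (pvRunPieces s.toList))

-- ===== PRECONDITION & SPEC =====
def Spec_tidy_word (text : String) (out : String) : Prop := out = tidy_word_alt text
instance (text : String) (out : String) : Decidable (Spec_tidy_word text out) := by unfold Spec_tidy_word; infer_instance

-- ===== CLAIM (what is proved, stated in full; the proofs are below) =====
def Claim_equal_tidy_word : Prop := ∀ (text : String), Dom_tidy_word text → Spec_tidy_word text (tidy_word text)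

-- ===== LEMMAS AND PROOFS =====

-- the collapse pass as a state machine: p = second-last kept char, q = last kept char
def pvM (p q : Option Char) : List Char → List Char
  | [] => []
  | c :: t => if p = some c ∧ q = some c then pvM p q t else c :: pvM q (some c) t

theorem pvM_cons (p q : Option Char) (c : Char) (t : List Char) :
    pvM p q (c :: t) = if p = some c ∧ q = some c then pvM p q t else c :: pvM q (some c) t := rfl

-- pvM only looks at q and at whether p = q
theorem pvM_congr (l : List Char) : ∀ (p p' q : Option Char), ((p = q) ↔ (p' = q)) →
    pvM p q l = pvM p' q l := by
  induction l with
  | nil => intro p p' q _; rfl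
  | cons c t ih =>
    intro p p' q h
    rw [pvM_cons, pvM_cons]
    by_cases hq : q = some c
    · subst hq
      by_cases hp : p = some c
      · rw [if_pos ⟨hp, rfl⟩, if_pos ⟨h.mp hp, rfl⟩]
        exact ih p p' (some c) h
      · rw [if_neg (fun hh => hp hh.1), if_neg (fun hh => hp (h.mpr hh.1))]
    · rw [if_neg (fun hh => hq hh.2), if_neg (fun hh => hq hh.2)]

-- negative indexing facts needed for the A-side fold
theorem pvGet_append_neg_one (l : List Char) (c : Char) :
    PySem.List.pyGet? (l ++ [c]) (-1) = some c := by
  rw [PySem.List.pyGet?_neg_one]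
  simp

theorem pvGet_append_neg_two (l : List Char) (c : Char) :
    PySem.List.pyGet? (l ++ [c]) (-2) = PySem.List.pyGet? l (-1) := by
  cases l with
  | nil => simp [PySem.List.pyGet?, PySem.List.pyIdx?]
  | cons x xs =>
    have e1 : PySem.List.pyIdx? ((x :: xs) ++ [c]).length (-2) = some xs.length := by
      simp only [PySem.List.pyIdx?]
      rw [if_neg (show ¬(0 : Int) ≤ -2 from by decide),
        if_pos (show -(((x :: xs) ++ [c]).length : Int) ≤ -2 from by
          have hL : ((x :: xs) ++ [c]).length = xs.length + 2 := by simp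
          rw [hL]; omega)]
      congr 1
      rw [show ((-(-2 : Int)).toNat) = 2 from by decide,
        show ((x :: xs) ++ [c]).length = xs.length + 2 from by simp]
      omega
    have e2 : PySem.List.pyIdx? (x :: xs).length (-1) = some xs.length := by
      simp only [PySem.List.pyIdx?]
      rw [if_neg (show ¬(0 : Int) ≤ -1 from by decide),
        if_pos (show -((x :: xs).length : Int) ≤ -1 from by
          have hl : (x :: xs).length = xs.length + 1 := by simp
          rw [hl]; omega)]
      congr 1
    simp only [PySem.List.pyGet?, e1, e2]
    show ((x :: xs) ++ [c])[xs.length]? = (x :: xs)[xs.length]?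
    rw [List.getElem?_append_left (by simp)]

theorem pvGet_neg_two_length (l : List Char) (c : Char)
    (h : PySem.List.pyGet? l (-2) = some c) : 2 ≤ l.length := by
  by_contra hlt
  have hnone : PySem.List.pyIdx? l.length (-2) = none := by
    simp only [PySem.List.pyIdx?]
    rw [if_neg (show ¬(0 : Int) ≤ -2 from by decide),
      if_neg (show ¬-(l.length : Int) ≤ -2 from by omega)]
  simp only [PySem.List.pyGet?, hnone] at h
  exact absurd h (by simp)

-- A's collapse fold computes pvM started from the last two kept characters
theorem pvFoldA_eq_pvM (l : List Char) : ∀ acc : List Char,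
    List.foldl pvStepA acc l
      = acc ++ pvM (PySem.List.pyGet? acc (-2)) (PySem.List.pyGet? acc (-1)) l := by
  induction l with
  | nil => intro acc; simp [pvM]
  | cons c t ih =>
    intro acc
    rw [List.foldl_cons, pvM_cons]
    by_cases hc : PySem.List.pyGet? acc (-2) = some c ∧ PySem.List.pyGet? acc (-1) = some c
    · have hcond : 2 ≤ acc.length ∧ PySem.List.pyGet? acc (-1) = some c
          ∧ PySem.List.pyGet? acc (-2) = some c :=
        ⟨pvGet_neg_two_length acc c hc.1, hc.2, hc.1⟩
      rw [if_pos hc]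
      simp only [pvStepA, if_pos hcond]
      exact ih acc
    · have hcond : ¬ (2 ≤ acc.length ∧ PySem.List.pyGet? acc (-1) = some c
          ∧ PySem.List.pyGet? acc (-2) = some c) := by
        intro ⟨_, h1, h2⟩; exact hc ⟨h2, h1⟩
      rw [if_neg hc]
      simp only [pvStepA, if_neg hcond]
      rw [ih (acc ++ [c]), pvGet_append_neg_one, pvGet_append_neg_two, List.append_assoc]
      rfl

-- inserting a third equal character into a run of two does not change pvM
theorem pvM_triple (a : Char) (t : List Char) :
    ∀ (u : List Char) (p q : Option Char),
      pvM p q (u ++ a :: a :: a :: t) = pvM p q (u ++ a :: a :: t) := by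
  intro u
  induction u with
  | nil =>
    intro p q
    simp only [List.nil_append]
    by_cases h : p = some a ∧ q = some a
    · rw [pvM_cons p q a (a :: a :: t), if_pos h, pvM_cons p q a (a :: t), if_pos h]
    · rw [pvM_cons p q a (a :: a :: t), if_neg h, pvM_cons p q a (a :: t), if_neg h]
      congr 1
      by_cases hq : q = some a
      · rw [pvM_cons q (some a) a (a :: t), if_pos ⟨hq, rfl⟩]
      · rw [pvM_cons q (some a) a (a :: t), if_neg (fun hh => hq hh.1),
          pvM_cons (some a) (some a) a t, if_pos ⟨rfl, rfl⟩,
          pvM_cons q (some a) a t, if_neg (fun hh => hq hh.1)]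
  | cons x u' ih =>
    intro p q
    simp only [List.cons_append]
    rw [pvM_cons p q x (u' ++ a :: a :: a :: t), pvM_cons p q x (u' ++ a :: a :: t)]
    by_cases h : p = some x ∧ q = some x
    · rw [if_pos h, if_pos h, ih p q]
    · rw [if_neg h, if_neg h, ih q (some x)]

-- equations of the scanner inside str.replace
theorem pvGo_zero (old new l acc : List Char) :
    PySem.Chars.replace.go old new 0 l acc = acc.reverse ++ l := rfl

theorem pvGo_nil (old new : List Char) (f : Nat) (acc : List Char) :
    PySem.Chars.replace.go old new (f + 1) [] acc = acc.reverse := rfl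

theorem pvGo_cons (old new : List Char) (f : Nat) (c : Char) (t acc : List Char) :
    PySem.Chars.replace.go old new (f + 1) (c :: t) acc
      = if old.isPrefixOf (c :: t) then
          PySem.Chars.replace.go old new f (List.drop old.length (c :: t)) (new.reverse ++ acc)
        else PySem.Chars.replace.go old new f t (c :: acc) := rfl

-- one str.replace("aaa","aa") pass leaves pvM unchanged
theorem pvGo_inv (a : Char) : ∀ (fuel : Nat) (l acc : List Char),
    pvM none none (PySem.Chars.replace.go [a, a, a] [a, a] fuel l acc)
      = pvM none none (acc.reverse ++ l) := by
  intro fuel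
  induction fuel with
  | zero => intro l acc; rw [pvGo_zero]
  | succ f ih =>
    intro l acc
    match l with
    | [] => rw [pvGo_nil]; simp
    | c :: t =>
      rw [pvGo_cons]
      by_cases hp : List.isPrefixOf [a, a, a] (c :: t) = true
      · rw [if_pos hp]
        obtain ⟨r, hr⟩ := List.isPrefixOf_iff_prefix.mp hp
        have hr' : a :: a :: a :: r = c :: t := hr
        injection hr' with h1 h2
        subst h1; subst h2
        rw [show List.drop ([a, a, a] : List Char).length (a :: a :: a :: r) = r from rfl,
          show (([a, a] : List Char).reverse ++ acc) = a :: a :: acc from rfl,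
          ih r (a :: a :: acc),
          show ((a :: a :: acc).reverse : List Char) = acc.reverse ++ ([a, a] : List Char) from by simp,
          List.append_assoc,
          show (([a, a] : List Char) ++ r) = a :: a :: r from rfl]
        exact (pvM_triple a r acc.reverse none none).symm
      · rw [if_neg hp, ih t (c :: acc)]
        simp

theorem pvReplace_inv (a : Char) (s : List Char) :
    pvM none none (PySem.Chars.replace s [a, a, a] [a, a]) = pvM none none s := by
  have h : PySem.Chars.replace s [a, a, a] [a, a]
      = PySem.Chars.replace.go [a, a, a] [a, a] s.length s [] := by
    rw [PySem.Chars.replace]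
    simp
  rw [h, pvGo_inv a s.length s []]
  rfl

theorem pvVloop_inv (a : Char) : ∀ (fuel : Nat) (s : List Char),
    pvM none none (pvVloop a fuel s) = pvM none none s := by
  intro fuel
  induction fuel with
  | zero => intro s; rfl
  | succ f ih =>
    intro s
    rw [show pvVloop a (f + 1) s
        = if PySem.Chars.isIn [a, a, a] s then
            pvVloop a f (PySem.Chars.replace s [a, a, a] [a, a])
          else s from rfl]
    by_cases h : PySem.Chars.isIn [a, a, a] s = true
    · rw [if_pos h, ih, pvReplace_inv]
    · rw [if_neg h]

theorem pvVloops_inv (cs : List Char) : ∀ s : List Char,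
    pvM none none (List.foldl (fun r a => pvVloop a r.length r) s cs) = pvM none none s := by
  induction cs with
  | nil => intro s; rfl
  | cons c cs ih => intro s; rw [List.foldl_cons, ih, pvVloop_inv]

-- after two equal kept chars, a further block of that char is dropped entirely
theorem pvM_skip (c : Char) (r : List Char)
    (hr : r = [] ∨ ∃ d r', r = d :: r' ∧ d ≠ c) :
    ∀ j : Nat, pvM (some c) (some c) (List.replicate j c ++ r) = pvM none none r := by
  intro j
  induction j with
  | zero =>
    match hr with
    | Or.inl h => subst h; rfl
    | Or.inr ⟨d, r', hrr, hd⟩ =>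
      subst hrr
      simp only [List.replicate_zero, List.nil_append]
      rw [pvM_cons (some c) (some c) d r',
        if_neg (fun hh => hd (Option.some.inj hh.1).symm),
        pvM_cons none none d r', if_neg (by rintro ⟨h1, _⟩; cases h1)]
      exact congrArg (d :: ·) (pvM_congr r' (some c) none (some d)
        (by simp; exact fun e => hd e.symm))
  | succ j ihj =>
    rw [List.replicate_succ, List.cons_append, pvM_cons, if_pos ⟨rfl, rfl⟩]
    exact ihj

-- one maximal run, entered right after its first character was emitted
theorem pvM_run (c : Char) (r : List Char)
    (hr : r = [] ∨ ∃ d r', r = d :: r' ∧ d ≠ c) :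
    ∀ k : Nat, pvM none (some c) (List.replicate k c ++ r)
      = List.replicate (min k 1) c ++ pvM none none r := by
  intro k
  match k with
  | 0 =>
    match hr with
    | Or.inl h => subst h; rfl
    | Or.inr ⟨d, r', hrr, hd⟩ =>
      subst hrr
      simp only [List.replicate_zero, List.nil_append, Nat.zero_min]
      rw [pvM_cons none (some c) d r', if_neg (by rintro ⟨h1, _⟩; cases h1),
        pvM_cons none none d r', if_neg (by rintro ⟨h1, _⟩; cases h1)]
      exact congrArg (d :: ·) (pvM_congr r' (some c) none (some d)
        (by simp; exact fun e => hd e.symm))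
  | k + 1 =>
    rw [List.replicate_succ, List.cons_append,
      pvM_cons none (some c) c _, if_neg (by rintro ⟨h1, _⟩; cases h1),
      pvM_skip c r hr k]
    simp

-- pvM from the empty state produces exactly the runs capped at 2
theorem pvM_eq_runPieces (l : List Char) :
    pvM none none l = List.flatten (pvRunPieces l) := by
  induction hn : l.length using Nat.strong_induction_on generalizing l with
  | _ n ihn =>
  match l with
  | [] => rw [pvRunPieces]; rfl
  | c :: t =>
    rw [pvRunPieces]
    have htw : t.takeWhile (· == c) = List.replicate (t.takeWhile (· == c)).length c := by
      apply List.eq_replicate_of_mem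
      intro b hb
      have hb' := List.mem_takeWhile_imp hb
      simp at hb'
      exact hb'
    have hdw : t.dropWhile (· == c) = [] ∨
        ∃ d r', t.dropWhile (· == c) = d :: r' ∧ d ≠ c := by
      match hd : t.dropWhile (· == c) with
      | [] => exact Or.inl rfl
      | d :: r' =>
        refine Or.inr ⟨d, r', rfl, ?_⟩
        have h := List.head?_dropWhile_not (· == c) t
        rw [hd] at h
        simpa using h
    have hsplit : t = t.takeWhile (· == c) ++ t.dropWhile (· == c) :=
      (List.takeWhile_append_dropWhile).symm
    rw [pvM_cons none none c t, if_neg (by rintro ⟨h1, _⟩; cases h1)]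
    conv_lhs => rw [hsplit, htw]
    rw [pvM_run c _ hdw]
    have hrec : pvM none none (t.dropWhile (· == c))
        = List.flatten (pvRunPieces (t.dropWhile (· == c))) := by
      have hle := List.length_dropWhile_le (· == c) t
      have hlen : t.length + 1 = n := by simpa using hn
      exact ihn (t.dropWhile (· == c)).length (by omega) _ rfl
    rw [hrec, List.flatten_cons]
    rcases Nat.eq_zero_or_pos (t.takeWhile (· == c)).length with h0 | h1
    · rw [h0]; simp
    · rw [show min (t.takeWhile (· == c)).length 1 = 1 from by omega,
        show min (1 + (t.takeWhile (· == c)).length) 2 = 2 from by omega]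
      rfl

-- ===== VERDICT (by name: the statement is the Claim_ definition above) =====
theorem tidy_word_spec : Claim_equal_tidy_word := by
  intro text _
  show tidy_word text = tidy_word_alt text
  simp only [tidy_word, tidy_word_alt]
  rw [pvFoldA_eq_pvM,
    show PySem.List.pyGet? ([] : List Char) (-2) = none from by decide,
    show PySem.List.pyGet? ([] : List Char) (-1) = none from by decide,
    List.nil_append, pvVloops_inv, pvM_eq_runPieces]
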